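-- pv_equiv track=rewrite | github.com/JewelreyBoxAI/impact-realty-ai | of_folder/src/agents/social_agents_l3/insta.py | _finalize_caption
-- ===== SOURCE A (Python) =====
-- from typing import Dict, List, Optional, Any, Union
--
-- def _finalize_caption(caption: str, hashtags: List[str]) -> str:
--     """Finalize caption with hashtags."""
--     if not hashtags:
--         return caption
--
--     # Add hashtags at the end
--     hashtag_text = " ".join(hashtags)
--
--     # Add spacing
--     final_caption = f"{caption}\n\n{hashtag_text}"
--
--     # Ensure we don't exceed character limit
--     if len(final_caption) > 2200:
--         # Reduce hashtags
--         while len(final_caption) > 2200 and hashtags: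
--             hashtags.pop()
--             hashtag_text = " ".join(hashtags)
--             final_caption = f"{caption}\n\n{hashtag_text}"
--
--     return final_caption
-- ===== SOURCE B (Python) =====
-- from typing import List
--
-- def _finalize_caption(caption: str, hashtags: List[str]) -> str:
--     """Finalize caption with hashtags (single pass; does not mutate hashtags)."""
--     if not hashtags:
--         return caption
--     budget = 2200 - len(caption) - 2  # room left for the joined hashtag text
--     total = 0
--     k = 0
--     for i, h in enumerate(hashtags):
--         cand = total + len(h) + (1 if i else 0)
--         if cand > budget:
--             break
--         total = cand
--         k = i + 1
--     return caption + "\n\n" + " ".join(hashtags[:k])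
-- ===== Notes on version B (the rewrite author's own statement) =====
-- stated objective: faster
-- what changed: Instead of repeatedly popping a hashtag and re-joining the whole list until the caption fits (A also mutates the hashtags list in place; B does not - the equivalence is about the return value), B computes in one pass a running joined-length to find the largest hashtag prefix that fits in 2200 chars and builds the final string once.
import Mathlib
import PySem

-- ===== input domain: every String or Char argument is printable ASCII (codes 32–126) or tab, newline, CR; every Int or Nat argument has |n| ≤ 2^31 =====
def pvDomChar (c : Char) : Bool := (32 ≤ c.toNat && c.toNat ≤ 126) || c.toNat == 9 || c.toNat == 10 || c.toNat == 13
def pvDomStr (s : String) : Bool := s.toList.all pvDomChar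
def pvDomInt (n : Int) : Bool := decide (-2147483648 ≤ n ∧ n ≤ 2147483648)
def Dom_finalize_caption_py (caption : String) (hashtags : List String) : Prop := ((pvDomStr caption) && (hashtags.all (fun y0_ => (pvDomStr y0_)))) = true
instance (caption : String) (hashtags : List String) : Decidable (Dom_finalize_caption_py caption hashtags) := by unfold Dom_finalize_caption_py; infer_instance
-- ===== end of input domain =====

-- B replaces A's pop-and-rejoin loop by one pass with a running joined length; equivalence is about the
-- RETURN value only (Python A pops from the caller's hashtags list in place, B does not mutate it).

-- ===== PORT A =====
-- A's while loop: pop the last hashtag and rebuild the caption until it fits or the list is empty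
def finalize_loop (caption : String) (hs : List String) : String :=
  let hashtag_text := PySem.Str.join " " hs
  let final_caption := caption ++ "\n\n" ++ hashtag_text
  if h : PySem.Str.len final_caption > 2200 ∧ hs ≠ [] then
    finalize_loop caption hs.dropLast
  else final_caption
termination_by hs.length
decreasing_by
  simp only [List.length_dropLast]
  have hl : hs.length ≠ 0 := fun e => h.2 (List.eq_nil_of_length_eq_zero e)
  omega

def finalize_caption_py (caption : String) (hashtags : List String) : String :=
  if hashtags = [] then caption
  else
    let hashtag_text := PySem.Str.join " " hashtags
    let final_caption := caption ++ "\n\n" ++ hashtag_text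
    if PySem.Str.len final_caption > 2200 then finalize_loop caption hashtags
    else final_caption

-- ===== PORT B =====
-- B's for-loop: running length `total` of " ".join of the accepted prefix, stop at the first hashtag that
-- does not fit; `k` counts the accepted hashtags
def altScan (budget : Int) : List String → Nat → Int → Nat → Nat
  | [], _, _, k => k
  | h :: t, i, total, k =>
    let cand := total + PySem.Str.len h + (if i = 0 then 0 else 1)
    if cand > budget then k
    else altScan budget t (i + 1) cand (i + 1)

def finalize_caption_py_alt (caption : String) (hashtags : List String) : String :=
  if hashtags = [] then caption
  else
    let budget := 2200 - PySem.Str.len caption - 2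
    let k := altScan budget hashtags 0 0 0
    caption ++ "\n\n" ++ PySem.Str.join " " (hashtags.take k)

-- ===== PRECONDITION & SPEC =====
def Spec_finalize_caption_py (caption : String) (hashtags : List String) (out : String) : Prop := out = finalize_caption_py_alt caption hashtags
instance (caption : String) (hashtags : List String) (out : String) : Decidable (Spec_finalize_caption_py caption hashtags out) := by unfold Spec_finalize_caption_py; infer_instance

-- ===== CLAIM (what is proved, stated in full; the proofs are below) =====
def Claim_equal_finalize_caption_py : Prop := ∀ (caption : String) (hashtags : List String), Dom_finalize_caption_py caption hashtags → Spec_finalize_caption_py caption hashtags (finalize_caption_py caption hashtags)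

-- ===== LEMMAS AND PROOFS =====

-- length of the joined hashtag text
def J (l : List String) : Int := PySem.Str.len (PySem.Str.join " " l)
-- sum of the hashtag lengths
def S (l : List String) : Int := (l.map PySem.Str.len).sum

theorem len_nonneg (s : String) : 0 ≤ PySem.Str.len s := by
  rw [PySem.Str.len_eq]; exact_mod_cast Nat.zero_le _

theorem S_nonneg (l : List String) : 0 ≤ S l := by
  induction l with
  | nil => simp [S]
  | cons x t ih =>
    have := len_nonneg x
    simp only [S, List.map_cons, List.sum_cons] at *
    omega

theorem J_nil : J [] = 0 := by decide

theorem J_nonneg (l : List String) : 0 ≤ J l := len_nonneg _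

theorem S_append (l r : List String) : S (l ++ r) = S l + S r := by
  simp [S]

theorem J_singleton (x : String) : J [x] = PySem.Str.len x := by
  simp [J, PySem.Str.len_eq, PySem.Str.toList_join, PySem.Chars.join_singleton]

theorem J_cons_cons (x y : String) (rest : List String) :
    J (x :: y :: rest) = PySem.Str.len x + 1 + J (y :: rest) := by
  simp only [J, PySem.Str.len_eq, PySem.Str.toList_join, List.map_cons,
    PySem.Chars.join_cons_cons, List.length_append,
    show (" ".toList).length = 1 from by decide]
  push_cast
  omega

theorem J_formula (l : List String) (h : l ≠ []) : J l = S l + l.length - 1 := by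
  induction l with
  | nil => exact absurd rfl h
  | cons x t ih =>
    cases t with
    | nil => simp [J_singleton, S]
    | cons y rest =>
      have hne : (y :: rest) ≠ [] := by simp
      rw [J_cons_cons, ih hne]
      simp only [S, List.map_cons, List.sum_cons, List.length_cons]
      push_cast
      ring

theorem J_snoc (l : List String) (x : String) :
    J (l ++ [x]) = J l + PySem.Str.len x + (if l = [] then 0 else 1) := by
  cases l with
  | nil => simp [J_singleton, J_nil]
  | cons a t =>
    have h1 : (a :: t) ++ [x] ≠ [] := by simp
    have h2 : (a :: t) ≠ [] := by simp
    rw [J_formula _ h1, J_formula _ h2, S_append]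
    simp only [if_neg h2, S, List.map_cons, List.map_nil, List.sum_cons, List.sum_nil,
      List.length_append, List.length_cons, List.length_nil]
    push_cast
    ring

theorem J_prefix_le (l r : List String) : J l ≤ J (l ++ r) := by
  cases hl : l with
  | nil => simpa [J_nil] using J_nonneg r
  | cons a t =>
    cases hr : r with
    | nil => simp
    | cons b u =>
      have h1 : (a :: t) ≠ [] := by simp
      have h2 : (a :: t) ++ (b :: u) ≠ [] := by simp
      rw [J_formula _ h1, J_formula _ h2, S_append]
      have := S_nonneg (b :: u)
      simp only [List.length_append, List.length_cons]
      push_cast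
      omega

-- proof-side form of B's scan: `done` is the accepted prefix
def Kp (b : Int) : List String → List String → Nat
  | done, [] => done.length
  | done, h :: t => if J (done ++ [h]) > b then done.length else Kp b (done ++ [h]) t

theorem altScan_eq_Kp (b : Int) (t done : List String) :
    altScan b t done.length (J done) done.length = Kp b done t := by
  induction t generalizing done with
  | nil => rfl
  | cons h t' ih =>
    have hcand : J done + PySem.Str.len h + (if done.length = 0 then 0 else 1)
        = J (done ++ [h]) := by
      rw [J_snoc]
      by_cases hd : done = [] <;> simp [hd]
    simp only [altScan, hcand]
    by_cases hb : J (done ++ [h]) > b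
    · simp [Kp, hb]
    · have hlen : done.length + 1 = (done ++ [h]).length := by simp
      simp only [Kp, if_neg hb, hlen]
      exact ih (done ++ [h])

theorem Kp_le (b : Int) (t done : List String) : Kp b done t ≤ done.length + t.length := by
  induction t generalizing done with
  | nil => simp [Kp]
  | cons h t' ih =>
    simp only [Kp, List.length_cons]
    split_ifs with hb
    · omega
    · have := ih (done ++ [h])
      simp only [List.length_append, List.length_cons, List.length_nil] at this
      omega

theorem Kp_all (b : Int) (t done : List String) (h : J (done ++ t) ≤ b) :
    Kp b done t = done.length + t.length := by
  induction t generalizing done with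
  | nil => simp [Kp]
  | cons x t' ih =>
    have hpre : J (done ++ [x]) ≤ b := by
      have := J_prefix_le (done ++ [x]) t'
      rw [List.append_assoc] at this
      simp only [List.singleton_append] at this
      omega
    have hnb : ¬ J (done ++ [x]) > b := by omega
    have := ih (done ++ [x]) (by rwa [List.append_assoc, List.singleton_append])
    simp only [Kp, if_neg hnb, this, List.length_append, List.length_cons, List.length_nil]
    omega

theorem Kp_dropLast (b : Int) (t done : List String) (ht : t ≠ []) (h : J (done ++ t) > b) :
    Kp b done t = Kp b done t.dropLast := by
  induction t generalizing done with
  | nil => exact absurd rfl ht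
  | cons x t' ih =>
    cases t' with
    | nil =>
      have hd : ([x] : List String).dropLast = [] := rfl
      rw [hd]
      simp [Kp, h]
    | cons y u =>
      have hne : (y :: u) ≠ [] := by simp
      rw [List.dropLast_cons_of_ne_nil hne]
      show (if J (done ++ [x]) > b then done.length else Kp b (done ++ [x]) (y :: u))
        = (if J (done ++ [x]) > b then done.length else Kp b (done ++ [x]) ((y :: u).dropLast))
      by_cases hb : J (done ++ [x]) > b
      · rw [if_pos hb, if_pos hb]
      · rw [if_neg hb, if_neg hb]
        exact ih (done ++ [x]) hne (by rwa [List.append_assoc, List.singleton_append])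

theorem len_fc (caption : String) (hs : List String) :
    PySem.Str.len (caption ++ "\n\n" ++ PySem.Str.join " " hs)
      = PySem.Str.len caption + 2 + J hs := by
  rw [PySem.Str.len_append, PySem.Str.len_append, J]
  have : PySem.Str.len "\n\n" = 2 := by decide
  omega

theorem finalize_loop_eq (caption : String) (hs : List String) :
    finalize_loop caption hs
      = caption ++ "\n\n" ++ PySem.Str.join " "
          (hs.take (Kp (2200 - PySem.Str.len caption - 2) [] hs)) := by
  fun_induction finalize_loop caption hs with
  | case1 hs hashtag_text final_caption h ih =>
    -- recursive step: the whole list does not fit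
    have hJ : J hs > 2200 - PySem.Str.len caption - 2 := by
      have := h.1
      rw [len_fc caption hs] at this
      omega
    rw [ih, Kp_dropLast _ hs [] h.2 (by simpa using hJ)]
    set k := Kp (2200 - PySem.Str.len caption - 2) [] hs.dropLast with hkdef
    have hk : k ≤ hs.length - 1 := by
      have := Kp_le (2200 - PySem.Str.len caption - 2) hs.dropLast []
      simp only [List.length_nil, Nat.zero_add, List.length_dropLast] at this
      rw [hkdef]
      exact this
    rw [List.dropLast_eq_take, List.take_take, Nat.min_eq_left hk]
  | case2 hs hashtag_text final_caption h =>
    -- exit: fits, or the list is empty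
    rw [not_and_or, not_not] at h
    rcases h with h | h
    · rw [not_lt] at h
      have hJ : J hs ≤ 2200 - PySem.Str.len caption - 2 := by
        rw [len_fc caption hs] at h
        omega
      have := Kp_all (2200 - PySem.Str.len caption - 2) hs [] (by simpa using hJ)
      simp only [List.length_nil, Nat.zero_add] at this
      rw [this, List.take_length]
    · subst h
      rfl

-- ===== VERDICT (by name: the statement is the Claim_ definition above) =====
theorem finalize_caption_py_spec : Claim_equal_finalize_caption_py := by
  intro caption hashtags _
  unfold Spec_finalize_caption_py finalize_caption_py finalize_caption_py_alt
  by_cases hnil : hashtags = []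
  · simp [hnil]
  · simp only [if_neg hnil]
    have hscan : altScan (2200 - PySem.Str.len caption - 2) hashtags 0 0 0
        = Kp (2200 - PySem.Str.len caption - 2) [] hashtags := by
      have := altScan_eq_Kp (2200 - PySem.Str.len caption - 2) hashtags []
      simpa [J_nil] using this
    by_cases hbig :
        PySem.Str.len (caption ++ "\n\n" ++ PySem.Str.join " " hashtags) > 2200
    · rw [if_pos hbig, finalize_loop_eq, hscan]
    · rw [if_neg hbig, hscan]
      have hJ : J hashtags ≤ 2200 - PySem.Str.len caption - 2 := by
        rw [len_fc caption hashtags] at hbig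
        omega
      have := Kp_all (2200 - PySem.Str.len caption - 2) hashtags [] (by simpa using hJ)
      simp only [List.length_nil, Nat.zero_add] at this
      rw [this, List.take_length]
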